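-- pv_equiv track=rewrite | github.com/LucasCallamullo/Clases-Particulares | Trabajos Practicos y DESAFIOS/TRABAJO PRACTICO 2/TP_more.py | validar_si_es_hc_o_sc
-- ===== SOURCE A (Python) =====
-- def validar_si_es_hc_o_sc(linea):
--     # linea = omitir esta lineaHC.
--     # Reconocer si la linea/cadena contiene un HC o SC
--
--     tiene_h = False
--     tiene_hc = False
--
--     tiene_s = False
--     tiene_sc = False
--
--     for i in linea:
--         # i = o m i t i, r, H, , C,  ,e sta  linea.
--         # i = H C
--         # estoy dentro de una palabra
--         if i != " " and i != ".":
--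
--             # tiene hc
--             if i.lower() == "h":
--                 tiene_h = True
--
--             elif tiene_h and i.lower() == "c":
--                 tiene_hc = True
--
--             else:
--                 tiene_h = False
--
--             # tiene sc
--             if i.lower() == "s":
--                 tiene_s = True
--
--             elif tiene_s and i.lower() == "c":
--                 tiene_sc = True
--
--             else:
--                 tiene_s = False
--
--         # termino una palabra
--         else:
--             tiene_s = False
--             tiene_h = False
--
--     if tiene_hc:
--         return True
--
--     if tiene_sc:
--         return False
--     return False
-- ===== SOURCE B (Python) =====
-- def validar_si_es_hc_o_sc(linea):
--     # The sc-tracking and word-boundary resets in A never affect the result: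
--     # A returns True exactly when an 'h' immediately followed by 'c'
--     # (case-insensitively) occurs, i.e. "hc" is a substring of the lowercased line.
--     return "hc" in linea.lower()
-- ===== Notes on version B (the rewrite author's own statement) =====
-- stated objective: idiomatic
-- what changed: Replaced the manual four-flag finite-state character loop (whose sc flags and space/dot resets are dead code for the result) with a single built-in substring test on the lowercased line.
import Mathlib
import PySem

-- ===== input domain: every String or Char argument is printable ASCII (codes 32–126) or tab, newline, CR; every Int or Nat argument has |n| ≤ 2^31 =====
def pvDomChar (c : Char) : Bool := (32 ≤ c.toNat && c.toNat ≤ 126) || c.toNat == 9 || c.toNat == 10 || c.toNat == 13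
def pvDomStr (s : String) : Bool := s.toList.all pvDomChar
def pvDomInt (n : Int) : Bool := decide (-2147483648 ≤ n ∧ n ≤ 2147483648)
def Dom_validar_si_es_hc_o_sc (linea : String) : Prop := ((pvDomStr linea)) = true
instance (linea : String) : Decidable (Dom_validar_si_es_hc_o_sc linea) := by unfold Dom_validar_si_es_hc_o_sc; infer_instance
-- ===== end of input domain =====

-- B replaces A's manual four-flag character scan (sc flags and space/dot resets are dead
-- w.r.t. the result) with a single built-in substring test: "hc" in linea.lower().


-- ===== PORT A =====
-- state = (tiene_h, tiene_hc, tiene_s, tiene_sc); one step per character, branches in A's order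
def pvStepA (st : Bool × Bool × Bool × Bool) (i : Char) : Bool × Bool × Bool × Bool :=
  let h := st.1; let hc := st.2.1; let s := st.2.2.1; let sc := st.2.2.2
  if i ≠ ' ' ∧ i ≠ '.' then
    let hh : Bool × Bool :=
      if PySem.Chars.lowerChar i = 'h' then (true, hc)
      else if h ∧ PySem.Chars.lowerChar i = 'c' then (h, true)
      else (false, hc)
    let ss : Bool × Bool :=
      if PySem.Chars.lowerChar i = 's' then (true, sc)
      else if s ∧ PySem.Chars.lowerChar i = 'c' then (s, true)
      else (false, sc)
    (hh.1, hh.2, ss.1, ss.2)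
  else
    (false, hc, false, sc)

def validar_si_es_hc_o_sc (linea : String) : Bool :=
  let st := linea.toList.foldl pvStepA (false, false, false, false)
  if st.2.1 then true
  else if st.2.2.2 then false
  else false

-- ===== PORT B =====
def validar_si_es_hc_o_sc_alt (linea : String) : Bool :=
  PySem.Str.isIn "hc" (PySem.Str.lower linea)

-- ===== PRECONDITION & SPEC =====
def Spec_validar_si_es_hc_o_sc (linea : String) (out : Bool) : Prop := out = validar_si_es_hc_o_sc_alt linea
instance (linea : String) (out : Bool) : Decidable (Spec_validar_si_es_hc_o_sc linea out) := by unfold Spec_validar_si_es_hc_o_sc; infer_instance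

-- ===== CLAIM (what is proved, stated in full; the proofs are below) =====
def Claim_equal_validar_si_es_hc_o_sc : Prop := ∀ (linea : String), Dom_validar_si_es_hc_o_sc linea → Spec_validar_si_es_hc_o_sc linea (validar_si_es_hc_o_sc linea)

-- ===== LEMMAS AND PROOFS =====

-- A's hc-flag computation, isolated: the value tiene_hc would get starting from tiene_h = h
def pvHcAux : Bool → List Char → Bool
  | _, [] => false
  | h, c :: t =>
    if c = ' ' ∨ c = '.' then pvHcAux false t
    else if PySem.Chars.lowerChar c = 'h' then pvHcAux true t
    else if h ∧ PySem.Chars.lowerChar c = 'c' then true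
    else pvHcAux false t

-- the hc component of A's fold ignores s/sc and is hc ∨ pvHcAux h
theorem pvFold_hc (l : List Char) : ∀ (h hc s sc : Bool),
    (l.foldl pvStepA (h, hc, s, sc)).2.1 = (hc || pvHcAux h l) := by
  induction l with
  | nil => intro h hc s sc; simp [pvHcAux]
  | cons c t ih =>
    intro h hc s sc
    simp only [List.foldl_cons, pvStepA, pvHcAux]
    by_cases hsp : c = ' ' ∨ c = '.'
    · rcases hsp with hsp | hsp <;> simp [hsp, ih]
    · rw [not_or] at hsp
      simp only [if_pos (by exact ⟨hsp.1, hsp.2⟩ : c ≠ ' ' ∧ c ≠ '.'),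
        if_neg (by simpa using hsp : ¬(c = ' ' ∨ c = '.'))]
      by_cases hH : PySem.Chars.lowerChar c = 'h'
      · simp [hH, ih]
      · by_cases hC : h ∧ PySem.Chars.lowerChar c = 'c'
        · rcases hC with ⟨hh, hc'⟩
          simp [hh, hc', ih]
        · have : ¬(h = true ∧ PySem.Chars.lowerChar c = 'c') := by tauto
          simp only [if_neg hH, if_neg this, ih]

-- head-of-rest test used by the cons characterisation of isIn ['h','c']
def pvHeadIsC (s : List Char) : Bool := s.head? == some 'c'

theorem pvPrefix_c_iff (s : List Char) : ['c'] <+: s ↔ pvHeadIsC s = true := by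
  rcases s with _ | ⟨y, t⟩
  · simp [pvHeadIsC]
  · rw [List.cons_prefix_cons]
    constructor
    · rintro ⟨rfl, -⟩; rfl
    · intro h
      have hy : y = 'c' := by simpa [pvHeadIsC] using h
      exact ⟨hy.symm, List.nil_prefix⟩

theorem pvIsIn_hc_cons (x : Char) (s : List Char) :
    PySem.Chars.isIn ['h', 'c'] (x :: s)
      = ((x == 'h') && pvHeadIsC s || PySem.Chars.isIn ['h', 'c'] s) := by
  refine Bool.eq_iff_iff.mpr ?_
  simp only [Bool.or_eq_true, Bool.and_eq_true, beq_iff_eq,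
    PySem.Chars.isIn_iff_infix, List.infix_cons_iff, List.cons_prefix_cons, pvPrefix_c_iff]
  constructor <;> rintro (⟨h1, h2⟩ | h)
  · exact Or.inl ⟨h1.symm, h2⟩
  · exact Or.inr h
  · exact Or.inl ⟨h1.symm, h2⟩
  · exact Or.inr h

-- lowered head test
def pvNextC : List Char → Bool
  | c :: _ => PySem.Chars.lowerChar c == 'c'
  | [] => false

@[simp] theorem pvNextC_nil : pvNextC [] = false := rfl
@[simp] theorem pvNextC_cons (c : Char) (t : List Char) :
    pvNextC (c :: t) = (PySem.Chars.lowerChar c == 'c') := rfl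

theorem pvHeadIsC_lower (t : List Char) : pvHeadIsC (PySem.Chars.lower t) = pvNextC t := by
  rcases t with _ | ⟨c, r⟩
  · rfl
  · show pvHeadIsC (PySem.Chars.lowerChar c :: PySem.Chars.lower r) = _
    simp [pvHeadIsC]

theorem pvHcAux_eq_isIn (l : List Char) : ∀ (h : Bool),
    pvHcAux h l = ((h && pvNextC l) || PySem.Chars.isIn ['h', 'c'] (PySem.Chars.lower l)) := by
  induction l with
  | nil =>
    intro h
    have : PySem.Chars.isIn ['h', 'c'] (PySem.Chars.lower []) = false := by decide
    simp [pvHcAux, this]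
  | cons c t ih =>
    intro h
    have hlow : PySem.Chars.lower (c :: t) = PySem.Chars.lowerChar c :: PySem.Chars.lower t := rfl
    rw [hlow, pvIsIn_hc_cons, pvHeadIsC_lower]
    simp only [pvHcAux, pvNextC_cons]
    by_cases hsp : c = ' ' ∨ c = '.'
    · have hlc : PySem.Chars.lowerChar c ≠ 'c' := by
        rcases hsp with h1 | h1 <;> subst h1 <;> decide
      have hlh : PySem.Chars.lowerChar c ≠ 'h' := by
        rcases hsp with h1 | h1 <;> subst h1 <;> decide
      have e1 : (PySem.Chars.lowerChar c == 'c') = false := by simpa using hlc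
      have e2 : (PySem.Chars.lowerChar c == 'h') = false := by simpa using hlh
      simp [hsp, ih, e1, e2]
    · simp only [if_neg hsp]
      by_cases hH : PySem.Chars.lowerChar c = 'h'
      · have : PySem.Chars.lowerChar c ≠ 'c' := by rw [hH]; decide
        simp [hH, ih, this]
      · by_cases hC : PySem.Chars.lowerChar c = 'c'
        · by_cases hh : h = true
          · simp [hC, hh]
          · have hh' : h = false := by simpa using hh
            simp [hC, hh', ih]
        · have : ¬(h = true ∧ PySem.Chars.lowerChar c = 'c') := by tauto
          have e1 : (PySem.Chars.lowerChar c == 'c') = false := by simpa using hC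
          have e2 : (PySem.Chars.lowerChar c == 'h') = false := by simpa using hH
          simp only [if_neg hH, ih, e1, e2]
          simp
          intro _ hc'
          exact absurd hc' hC

-- ===== VERDICT (by name: the statement is the Claim_ definition above) =====
theorem validar_si_es_hc_o_sc_spec : Claim_equal_validar_si_es_hc_o_sc := by
  intro linea _
  unfold Spec_validar_si_es_hc_o_sc validar_si_es_hc_o_sc validar_si_es_hc_o_sc_alt
  rw [PySem.Str.isIn_eq]
  simp only [PySem.Str.toList_lower]
  have h1 := pvFold_hc linea.toList false false false false
  have h2 := pvHcAux_eq_isIn linea.toList false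
  have hs : ("hc" : String).toList = ['h', 'c'] := rfl
  rw [hs]
  simp only [Bool.false_and, Bool.false_or] at h1 h2
  cases hv : PySem.Chars.isIn ['h', 'c'] (PySem.Chars.lower linea.toList) <;>
    simp [h1, h2, hv]
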